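-- pv_equiv track=rewrite | github.com/YunseoChoe/AlgorithmPy | 코드트리/CT_고대문명유적탐사.py | rot3x3
-- ===== SOURCE A (Python) =====
-- import copy
--
-- def rot3x3(board, sr, sc, deg):
--     sub_mat = [[0, 0, 0] for _ in range(3)]
--     # 3x3 자를 부분
--     for i in range(3):
--         for j in range(3):
--             sub_mat[i][j] = board[sr + i][sc + j]
--
--     return_board = copy.deepcopy(board)
--
--     # 90도 회전 함수 (180, 270도 회전 시에도 쓰임)
--     def rot90(mat):
--         """3x3 행렬을 시계방향으로 90도 회전 후 회전된 행렬 반환"""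
--         L = 3
--         res = [[0] * L for _ in range(L)]
--         for i in range(L):
--             for j in range(L):
--                 res[j][L - 1 - i] = mat[i][j]
--         return res
--
--     if deg == 90:
--         tmp = rot90(sub_mat)
--     elif deg == 180:
--         tmp = rot90(rot90(sub_mat))
--     else:
--         tmp = rot90(rot90(rot90(sub_mat)))
--
--     # 다시 5x5로 합치기
--     for i in range(3):
--         for j in range(3):
--             return_board[sr + i][sc + j] = tmp[i][j]
--
--     return return_board
-- ===== SOURCE B (Python) =====
-- import copy
--
-- def rot3x3(board, sr, sc, deg):
--     return_board = copy.deepcopy(board)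
--     for i in range(3):
--         for j in range(3):
--             if deg == 90:
--                 si, sj = 2 - j, i
--             elif deg == 180:
--                 si, sj = 2 - i, 2 - j
--             else:
--                 si, sj = j, 2 - i
--             return_board[sr + i][sc + j] = board[sr + si][sc + sj]
--     return return_board
-- ===== Notes on version B (the rewrite author's own statement) =====
-- stated objective: simpler
-- what changed: B drops the submatrix extraction and the rot90 helper (applied up to three times) and instead overwrites the 9 target cells in one pass with a direct per-degree source-coordinate mapping, reading from the original board.
import Mathlib
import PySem

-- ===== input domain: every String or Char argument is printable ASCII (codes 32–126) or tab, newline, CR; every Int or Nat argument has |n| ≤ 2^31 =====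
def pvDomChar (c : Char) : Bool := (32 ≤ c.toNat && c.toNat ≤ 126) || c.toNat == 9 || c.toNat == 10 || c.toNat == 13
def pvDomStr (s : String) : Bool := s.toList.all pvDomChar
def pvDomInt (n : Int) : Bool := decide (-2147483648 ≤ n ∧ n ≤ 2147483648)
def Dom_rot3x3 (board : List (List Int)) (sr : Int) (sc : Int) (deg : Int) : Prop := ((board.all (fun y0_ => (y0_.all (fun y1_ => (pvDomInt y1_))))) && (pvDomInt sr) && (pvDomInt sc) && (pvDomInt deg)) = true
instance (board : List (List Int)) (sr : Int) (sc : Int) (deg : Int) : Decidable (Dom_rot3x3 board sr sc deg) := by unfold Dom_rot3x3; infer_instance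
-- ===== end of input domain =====

-- B replaces A's submatrix extraction + up-to-three rot90 passes by one pass writing the 9
-- cells from a direct per-degree coordinate mapping (objective: simpler).

-- ===== PORT A =====
-- board[r][c] (python indexing; total form, in range under Pre_)
def pvCellGet (board : List (List Int)) (r : Int) (c : Int) : Int :=
  PySem.List.pyGetD (PySem.List.pyGetD board r ([] : List Int)) c 0

-- board[r][c] = v (python indexing; total form, in range under Pre_)
def pvCellSet (board : List (List Int)) (r : Int) (c : Int) (v : Int) : List (List Int) :=
  PySem.List.pySetD board r (PySem.List.pySetD (PySem.List.pyGetD board r ([] : List Int)) c v)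

-- A's inner helper rot90, transliterated (res = [[0]*3 for _ in range(3)], two loops)
def rot90A (mat : List (List Int)) : List (List Int) :=
  (PySem.List.pyRange 0 3 1).foldl (fun res i =>
    (PySem.List.pyRange 0 3 1).foldl (fun res j =>
      pvCellSet res j (3 - 1 - i) (pvCellGet mat i j)) res)
    ([[0,0,0],[0,0,0],[0,0,0]] : List (List Int))

def rot3x3 (board : List (List Int)) (sr : Int) (sc : Int) (deg : Int) : List (List Int) :=
  -- sub_mat = [[0,0,0] for _ in range(3)]; sub_mat[i][j] = board[sr+i][sc+j]
  let subMat : List (List Int) :=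
    (PySem.List.pyRange 0 3 1).foldl (fun m i =>
      (PySem.List.pyRange 0 3 1).foldl (fun m j =>
        pvCellSet m i j (pvCellGet board (sr + i) (sc + j))) m)
      ([[0,0,0],[0,0,0],[0,0,0]] : List (List Int))
  -- return_board = copy.deepcopy(board) (values are immutable in the port)
  let returnBoard := board
  let tmp : List (List Int) :=
    if deg = 90 then rot90A subMat
    else if deg = 180 then rot90A (rot90A subMat)
    else rot90A (rot90A (rot90A subMat))
  -- return_board[sr+i][sc+j] = tmp[i][j]
  (PySem.List.pyRange 0 3 1).foldl (fun rb i =>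
    (PySem.List.pyRange 0 3 1).foldl (fun rb j =>
      pvCellSet rb (sr + i) (sc + j) (pvCellGet tmp i j)) rb)
    returnBoard

-- ===== PORT B =====
def rot3x3_alt (board : List (List Int)) (sr : Int) (sc : Int) (deg : Int) : List (List Int) :=
  (PySem.List.pyRange 0 3 1).foldl (fun rb i =>
    (PySem.List.pyRange 0 3 1).foldl (fun rb j =>
      let s : Int × Int :=
        if deg = 90 then (2 - j, i)
        else if deg = 180 then (2 - i, 2 - j)
        else (j, 2 - i)
      pvCellSet rb (sr + i) (sc + j) (pvCellGet board (sr + s.1) (sc + s.2))) rb)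
    board

-- ===== PRECONDITION & SPEC =====
-- Pre_ excludes exactly the inputs where Python A raises IndexError: some read
-- board[sr+i][sc+j] or write return_board[sr+i][sc+j] (i,j in 0..2) is out of range.
def Pre_rot3x3 (board : List (List Int)) (sr : Int) (sc : Int) (deg : Int) : Prop :=
  ∀ i ∈ ([0, 1, 2] : List Int), PySem.Raise.InRange board.length (sr + i) ∧
    ∀ j ∈ ([0, 1, 2] : List Int),
      PySem.Raise.InRange (PySem.List.pyGetD board (sr + i) ([] : List Int)).length (sc + j)
instance (board : List (List Int)) (sr : Int) (sc : Int) (deg : Int) : Decidable (Pre_rot3x3 board sr sc deg) := by unfold Pre_rot3x3; infer_instance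

def pvWitness_rot3x3 : List (List Int) × Int × Int × Int :=
  ([[1, 2, 3], [4, 5, 6], [7, 8, 9]], 0, 0, 90)

def Spec_rot3x3 (board : List (List Int)) (sr : Int) (sc : Int) (deg : Int) (out : List (List Int)) : Prop := out = rot3x3_alt board sr sc deg
instance (board : List (List Int)) (sr : Int) (sc : Int) (deg : Int) (out : List (List Int)) : Decidable (Spec_rot3x3 board sr sc deg out) := by unfold Spec_rot3x3; infer_instance

-- ===== CLAIM (what is proved, stated in full; the proofs are below) =====
def Claim_equal_rot3x3 : Prop := ∀ (board : List (List Int)) (sr : Int) (sc : Int) (deg : Int), Dom_rot3x3 board sr sc deg → Pre_rot3x3 board sr sc deg → Spec_rot3x3 board sr sc deg (rot3x3 board sr sc deg)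

-- ===== LEMMAS AND PROOFS =====

-- evaluation of the PySem primitives on 3-element literal lists (the only shapes A's 3x3 code hits)
theorem pyGetD3_0 {α : Type} (a b c d : α) : PySem.List.pyGetD [a, b, c] 0 d = a := rfl
theorem pyGetD3_1 {α : Type} (a b c d : α) : PySem.List.pyGetD [a, b, c] 1 d = b := rfl
theorem pyGetD3_2 {α : Type} (a b c d : α) : PySem.List.pyGetD [a, b, c] 2 d = c := rfl
theorem pySetD3_0 {α : Type} (a b c v : α) : PySem.List.pySetD [a, b, c] 0 v = [v, b, c] := rfl
theorem pySetD3_1 {α : Type} (a b c v : α) : PySem.List.pySetD [a, b, c] 1 v = [a, v, c] := rfl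
theorem pySetD3_2 {α : Type} (a b c v : α) : PySem.List.pySetD [a, b, c] 2 v = [a, b, v] := rfl

-- the extraction loop of A produces the literal 3x3 submatrix
theorem pvSubMat_eval (board : List (List Int)) (sr sc : Int) :
    (PySem.List.pyRange 0 3 1).foldl (fun m i =>
      (PySem.List.pyRange 0 3 1).foldl (fun m j =>
        pvCellSet m i j (pvCellGet board (sr + i) (sc + j))) m)
      ([[0,0,0],[0,0,0],[0,0,0]] : List (List Int))
    = [[pvCellGet board sr sc, pvCellGet board sr (sc+1), pvCellGet board sr (sc+2)],
       [pvCellGet board (sr+1) sc, pvCellGet board (sr+1) (sc+1), pvCellGet board (sr+1) (sc+2)],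
       [pvCellGet board (sr+2) sc, pvCellGet board (sr+2) (sc+1), pvCellGet board (sr+2) (sc+2)]] := by
  rw [(by rfl : PySem.List.pyRange 0 3 1 = [0, 1, 2])]
  simp only [List.foldl_cons, List.foldl_nil]
  norm_num [pvCellSet, pyGetD3_0, pyGetD3_1, pyGetD3_2, pySetD3_0, pySetD3_1, pySetD3_2]

-- A's rot90 on a literal 3x3 matrix
theorem pvRot90A_eval (a b c d e f g h i : Int) :
    rot90A [[a,b,c],[d,e,f],[g,h,i]] = [[g,d,a],[h,e,b],[i,f,c]] := by
  unfold rot90A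
  rw [(by rfl : PySem.List.pyRange 0 3 1 = [0, 1, 2])]
  norm_num [List.foldl_cons, List.foldl_nil, pvCellSet, pvCellGet,
    pyGetD3_0, pyGetD3_1, pyGetD3_2, pySetD3_0, pySetD3_1, pySetD3_2]

-- ===== VERDICT (by name: the statement is the Claim_ definition above) =====
set_option maxHeartbeats 1000000 in
theorem rot3x3_spec : Claim_equal_rot3x3 := by
  intro board sr sc deg _ _
  unfold Spec_rot3x3
  simp only [rot3x3, rot3x3_alt, pvSubMat_eval]
  rw [(by rfl : PySem.List.pyRange 0 3 1 = [0, 1, 2])]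
  by_cases h90 : deg = 90
  · simp only [h90, if_true, pvRot90A_eval, List.foldl_cons, List.foldl_nil]
    norm_num [pvCellGet, pyGetD3_0, pyGetD3_1, pyGetD3_2]
  · by_cases h180 : deg = 180
    · simp only [h180, if_true, pvRot90A_eval, List.foldl_cons, List.foldl_nil]
      norm_num [pvCellGet, pyGetD3_0, pyGetD3_1, pyGetD3_2]
    · simp only [h90, h180, if_false, pvRot90A_eval, List.foldl_cons, List.foldl_nil]
      norm_num [pvCellGet, pyGetD3_0, pyGetD3_1, pyGetD3_2]
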